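-- pv_equiv track=rewrite | github.com/cyanluna-git/ai.cycling.workout.planner | src/services/workout_assembler.py | _determine_workout_type
-- ===== SOURCE A (Python) =====
-- from typing import Dict, List, Any, Optional
--
-- def _determine_workout_type(segments: List[Dict]) -> str:
--     """Determine overall workout type from segments."""
--     types = [seg.get("type", "Mixed") for seg in segments]
--
--     if "VO2max" in types:
--         return "VO2max"
--     elif "Threshold" in types:
--         return "Threshold"
--     elif "SweetSpot" in types:
--         return "SweetSpot"
--     else:
--         return "Endurance"
-- ===== SOURCE B (Python) =====
-- from typing import Dict, List
--
-- _PRIORITY = {"VO2max": 0, "Threshold": 1, "SweetSpot": 2}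
-- _NAMES = ("VO2max", "Threshold", "SweetSpot", "Endurance")
--
-- def _determine_workout_type(segments: List[Dict]) -> str:
--     """Single pass: track the best (lowest) priority rank seen; no intermediate list."""
--     best = 3
--     for seg in segments:
--         r = _PRIORITY.get(seg.get("type", "Mixed"), 3)
--         if r < best:
--             best = r
--     return _NAMES[best]
-- ===== Notes on version B (the rewrite author's own statement) =====
-- stated objective: alternative
-- what changed: Replaces the build-a-list-of-types plus four separate membership scans with a single pass over segments that keeps a running minimum priority rank (via a rank dict) and renders the final rank at the end.
import Mathlib
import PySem

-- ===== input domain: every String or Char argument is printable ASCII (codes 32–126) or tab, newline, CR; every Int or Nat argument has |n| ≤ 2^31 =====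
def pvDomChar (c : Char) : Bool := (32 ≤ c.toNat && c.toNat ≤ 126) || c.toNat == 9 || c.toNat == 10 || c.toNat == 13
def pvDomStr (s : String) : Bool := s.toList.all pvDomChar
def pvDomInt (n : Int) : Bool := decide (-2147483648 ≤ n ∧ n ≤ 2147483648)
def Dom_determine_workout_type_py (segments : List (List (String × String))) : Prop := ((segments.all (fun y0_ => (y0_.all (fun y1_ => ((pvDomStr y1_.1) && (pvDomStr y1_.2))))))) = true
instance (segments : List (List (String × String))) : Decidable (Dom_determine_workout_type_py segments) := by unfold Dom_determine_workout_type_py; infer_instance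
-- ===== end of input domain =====

-- B replaces A's list-of-types plus four membership checks with a single pass over segments keeping a running minimum priority rank (alternative decomposition, same asymptotic cost).


-- ===== PORT A =====
-- types = [seg.get("type", "Mixed") for seg in segments]; then four membership checks in priority order
def determine_workout_type_py (segments : List (List (String × String))) : String :=
  let types := segments.map (fun seg => PySem.Dict.getD (PySem.Dict.ofList seg) "type" "Mixed")
  if types.contains "VO2max" then "VO2max"
  else if types.contains "Threshold" then "Threshold"
  else if types.contains "SweetSpot" then "SweetSpot"
  else "Endurance"

-- ===== PORT B =====
-- _PRIORITY = {"VO2max": 0, "Threshold": 1, "SweetSpot": 2}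
def pvPriorityB : PySem.Dict String Int :=
  PySem.Dict.ofList [("VO2max", 0), ("Threshold", 1), ("SweetSpot", 2)]

-- the loop: for seg in segments: r = _PRIORITY.get(seg.get("type", "Mixed"), 3); if r < best: best = r
def pvLoopB : List (List (String × String)) → Int → Int
  | [], best => best
  | seg :: rest, best =>
      let r := pvPriorityB.getD (PySem.Dict.getD (PySem.Dict.ofList seg) "type" "Mixed") 3
      pvLoopB rest (if r < best then r else best)

-- return _NAMES[best], _NAMES = ("VO2max", "Threshold", "SweetSpot", "Endurance"); best ∈ {0,1,2,3} by construction
def determine_workout_type_py_alt (segments : List (List (String × String))) : String :=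
  let best := pvLoopB segments 3
  if best = 0 then "VO2max"
  else if best = 1 then "Threshold"
  else if best = 2 then "SweetSpot"
  else "Endurance"

-- ===== PRECONDITION & SPEC =====
def Spec_determine_workout_type_py (segments : List (List (String × String))) (out : String) : Prop := out = determine_workout_type_py_alt segments
instance (segments : List (List (String × String))) (out : String) : Decidable (Spec_determine_workout_type_py segments out) := by unfold Spec_determine_workout_type_py; infer_instance

-- ===== CLAIM (what is proved, stated in full; the proofs are below) =====
def Claim_equal_determine_workout_type_py : Prop := ∀ (segments : List (List (String × String))), Dom_determine_workout_type_py segments → Spec_determine_workout_type_py segments (determine_workout_type_py segments)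

-- ===== LEMMAS AND PROOFS =====

-- the type string of one segment, and its priority rank under B's dict
def pvTy (seg : List (String × String)) : String :=
  PySem.Dict.getD (PySem.Dict.ofList seg) "type" "Mixed"

def pvRank (seg : List (String × String)) : Int := pvPriorityB.getD (pvTy seg) 3

-- B's dict lookup as an if-chain on the key
theorem pvGetD_priority (t : String) : pvPriorityB.getD t 3 =
    if t = "VO2max" then 0 else if t = "Threshold" then 1 else if t = "SweetSpot" then 2 else 3 := by
  by_cases h0 : t = "VO2max"
  · subst h0; decide
  · by_cases h1 : t = "Threshold"
    · subst h1; decide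
    · by_cases h2 : t = "SweetSpot"
      · subst h2; decide
      · have e0 : ("VO2max" == t) = false := by simpa using fun h => h0 h.symm
        have e1 : ("Threshold" == t) = false := by simpa using fun h => h1 h.symm
        have e2 : ("SweetSpot" == t) = false := by simpa using fun h => h2 h.symm
        simp [pvPriorityB, PySem.Dict.getD, PySem.Dict.get?, PySem.Dict.ofList, PySem.Dict.update,
          PySem.Dict.empty, PySem.Dict.insert, List.find?, e0, e1, e2, h0, h1, h2]

theorem pvRank_bounds (seg : List (String × String)) : 0 ≤ pvRank seg ∧ pvRank seg ≤ 3 := by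
  rw [pvRank, pvGetD_priority]; split_ifs <;> omega

theorem pvRank_zero (seg : List (String × String)) : pvRank seg = 0 ↔ pvTy seg = "VO2max" := by
  rw [pvRank, pvGetD_priority]; split_ifs <;> simp_all
theorem pvRank_one (seg : List (String × String)) : pvRank seg = 1 ↔ pvTy seg = "Threshold" := by
  rw [pvRank, pvGetD_priority]; split_ifs <;> simp_all
theorem pvRank_two (seg : List (String × String)) : pvRank seg = 2 ↔ pvTy seg = "SweetSpot" := by
  rw [pvRank, pvGetD_priority]; split_ifs <;> simp_all

-- the minimum rank over the segments
def pvMinR : List (List (String × String)) → Int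
  | [] => 3
  | seg :: rest => min (pvRank seg) (pvMinR rest)

theorem pvMinR_bounds (segs : List (List (String × String))) : 0 ≤ pvMinR segs ∧ pvMinR segs ≤ 3 := by
  induction segs with
  | nil => simp [pvMinR]
  | cons s rest ih => have := pvRank_bounds s; simp only [pvMinR]; omega

theorem pvLoopB_eq_min (segs : List (List (String × String))) :
    ∀ best : Int, best ≤ 3 → pvLoopB segs best = min best (pvMinR segs) := by
  induction segs with
  | nil => intro best hb; simp only [pvLoopB, pvMinR]; omega
  | cons s rest ih =>
    intro best hb
    simp only [pvLoopB, pvMinR]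
    have h := pvRank_bounds s
    rw [show pvPriorityB.getD (PySem.Dict.getD (PySem.Dict.ofList s) "type" "Mixed") 3
          = pvRank s from rfl]
    rw [ih _ (by omega)]
    omega

theorem pvMinR_le_mem (segs : List (List (String × String))) (s : List (String × String))
    (hs : s ∈ segs) : pvMinR segs ≤ pvRank s := by
  induction segs with
  | nil => simp at hs
  | cons t ts ih =>
    rcases List.mem_cons.mp hs with h | h
    · subst h; simp only [pvMinR]; omega
    · have := ih h; simp only [pvMinR]; omega

theorem pvMinR_attained (segs : List (List (String × String))) (h : pvMinR segs < 3) :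
    ∃ s ∈ segs, pvRank s = pvMinR segs := by
  induction segs with
  | nil => simp [pvMinR] at h
  | cons t ts ih =>
    simp only [pvMinR] at h ⊢
    by_cases hc : pvRank t ≤ pvMinR ts
    · exact ⟨t, List.mem_cons_self, by omega⟩
    · obtain ⟨s, hs, hr⟩ := ih (by omega)
      exact ⟨s, List.mem_cons_of_mem _ hs, by omega⟩

-- membership of a name in the mapped types list, as an existential over segments
theorem pvContains_iff (segs : List (List (String × String))) (name : String) :
    ((segs.map (fun seg => PySem.Dict.getD (PySem.Dict.ofList seg) "type" "Mixed")).contains name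
      = true) ↔ ∃ s ∈ segs, pvTy s = name := by
  simp [List.mem_map, pvTy]

theorem determine_workout_type_py_spec : Claim_equal_determine_workout_type_py := by
  unfold Claim_equal_determine_workout_type_py
  intro segs _
  unfold Spec_determine_workout_type_py determine_workout_type_py determine_workout_type_py_alt
  rw [pvLoopB_eq_min segs 3 (by omega)]
  have hb := pvMinR_bounds segs
  have hmin : min (3 : Int) (pvMinR segs) = pvMinR segs := by omega
  rw [hmin]
  by_cases hI1 : ((segs.map (fun seg => PySem.Dict.getD (PySem.Dict.ofList seg) "type" "Mixed")).contains "VO2max" = true)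
  · obtain ⟨s, hs, hg⟩ := (pvContains_iff segs "VO2max").mp hI1
    have hr : pvRank s = 0 := (pvRank_zero s).mpr hg
    have hle := pvMinR_le_mem segs s hs
    have hv : pvMinR segs = 0 := by omega
    rw [if_pos hI1, hv]; norm_num
  · have hne0 : pvMinR segs ≠ 0 := by
      intro h
      obtain ⟨s, hs, hr⟩ := pvMinR_attained segs (by omega)
      exact hI1 ((pvContains_iff segs "VO2max").mpr ⟨s, hs, (pvRank_zero s).mp (by omega)⟩)
    by_cases hI2 : ((segs.map (fun seg => PySem.Dict.getD (PySem.Dict.ofList seg) "type" "Mixed")).contains "Threshold" = true)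
    · obtain ⟨s, hs, hg⟩ := (pvContains_iff segs "Threshold").mp hI2
      have hr : pvRank s = 1 := (pvRank_one s).mpr hg
      have hle := pvMinR_le_mem segs s hs
      have hv : pvMinR segs = 1 := by omega
      rw [if_neg hI1, if_pos hI2, hv]; norm_num
    · have hne1 : pvMinR segs ≠ 1 := by
        intro h
        obtain ⟨s, hs, hr⟩ := pvMinR_attained segs (by omega)
        exact hI2 ((pvContains_iff segs "Threshold").mpr ⟨s, hs, (pvRank_one s).mp (by omega)⟩)
      by_cases hI3 : ((segs.map (fun seg => PySem.Dict.getD (PySem.Dict.ofList seg) "type" "Mixed")).contains "SweetSpot" = true)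
      · obtain ⟨s, hs, hg⟩ := (pvContains_iff segs "SweetSpot").mp hI3
        have hr : pvRank s = 2 := (pvRank_two s).mpr hg
        have hle := pvMinR_le_mem segs s hs
        have hv : pvMinR segs = 2 := by omega
        rw [if_neg hI1, if_neg hI2, if_pos hI3, hv]; norm_num
      · have hne2 : pvMinR segs ≠ 2 := by
          intro h
          obtain ⟨s, hs, hr⟩ := pvMinR_attained segs (by omega)
          exact hI3 ((pvContains_iff segs "SweetSpot").mpr ⟨s, hs, (pvRank_two s).mp (by omega)⟩)
        have hv : pvMinR segs = 3 := by omega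
        rw [if_neg hI1, if_neg hI2, if_neg hI3, hv]; norm_num
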